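-- pv_equiv track=rewrite | github.com/WilliamLongXYZ/dungeons-and-dragons | main.py | determine_mods
-- ===== SOURCE A (Python) =====
-- def determine_mods(stats):
--     mods = []
--     for stat in stats:
--         if stat == 1: mod = -5
--         elif stat >= 2 and stat <= 3: mod = -4
--         elif stat >= 4 and stat <= 5: mod = -3
--         elif stat >= 6 and stat <= 7: mod = -2
--         elif stat >= 8 and stat <= 9: mod = -1
--         elif stat >= 10 and stat <= 11: mod = 0
--         elif stat >= 12 and stat <= 13: mod = 1
--         elif stat >= 14 and stat <= 15: mod = 2
--         elif stat >= 16 and stat <= 17: mod = 3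
--         elif stat >= 18 and stat <= 19: mod = 4
--         elif stat >= 20 and stat <= 21: mod = 5
--         elif stat >= 22 and stat <= 23: mod = 6
--         elif stat >= 24 and stat <= 25: mod = 7
--         elif stat >= 26 and stat <= 27: mod = 8
--         elif stat >= 28 and stat <= 29: mod = 9
--         elif stat == 30: mod = 10
--         else: return "Error"
--         mods.append(mod)
--     return mods
-- ===== SOURCE B (Python) =====
-- def determine_mods(stats):
--     # Closed form: D&D ability modifier is (stat - 10) // 2, valid for 1..30.
--     if any(not (1 <= s <= 30) for s in stats):
--         return "Error"
--     return [(s - 10) // 2 for s in stats]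
-- ===== Notes on version B (the rewrite author's own statement) =====
-- stated objective: simpler
-- what changed: Replaced the 16-branch elif ladder with a single range check followed by the closed-form floor-division modifier (stat - 10) // 2, validating all stats before building the list.
-- outside the precondition, e.g. on determine_mods([0]): A returns 'Error', B returns 'Error'
import Mathlib
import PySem

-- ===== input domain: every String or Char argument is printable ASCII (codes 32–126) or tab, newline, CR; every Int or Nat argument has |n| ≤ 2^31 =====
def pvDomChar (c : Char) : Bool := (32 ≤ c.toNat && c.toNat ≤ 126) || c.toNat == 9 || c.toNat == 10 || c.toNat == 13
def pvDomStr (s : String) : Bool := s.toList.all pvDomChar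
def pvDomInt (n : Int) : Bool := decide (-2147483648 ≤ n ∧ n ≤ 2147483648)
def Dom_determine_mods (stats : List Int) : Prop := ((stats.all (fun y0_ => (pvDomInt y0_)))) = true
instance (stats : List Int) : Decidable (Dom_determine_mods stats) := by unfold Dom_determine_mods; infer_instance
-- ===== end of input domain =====

-- B replaces A's 16-branch elif ladder with one range check plus the closed-form (stat-10)//2 (objective: simpler).

-- ===== PORT A =====
-- the elif ladder; none = the 'else: return "Error"' branch (a string, outside List Int)
def pvModA (stat : Int) : Option Int :=
  if stat == 1 then some (-5)
  else if stat ≥ 2 && stat ≤ 3 then some (-4)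
  else if stat ≥ 4 && stat ≤ 5 then some (-3)
  else if stat ≥ 6 && stat ≤ 7 then some (-2)
  else if stat ≥ 8 && stat ≤ 9 then some (-1)
  else if stat ≥ 10 && stat ≤ 11 then some 0
  else if stat ≥ 12 && stat ≤ 13 then some 1
  else if stat ≥ 14 && stat ≤ 15 then some 2
  else if stat ≥ 16 && stat ≤ 17 then some 3
  else if stat ≥ 18 && stat ≤ 19 then some 4
  else if stat ≥ 20 && stat ≤ 21 then some 5
  else if stat ≥ 22 && stat ≤ 23 then some 6
  else if stat ≥ 24 && stat ≤ 25 then some 7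
  else if stat ≥ 26 && stat ≤ 27 then some 8
  else if stat ≥ 28 && stat ≤ 29 then some 9
  else if stat == 30 then some 10
  else none

-- the loop: mods.append(mod), early return "Error" (= none) on a bad stat
def pvLoopA (stats : List Int) (mods : List Int) : Option (List Int) :=
  match stats with
  | [] => some mods
  | s :: rest =>
    match pvModA s with
    | none => none
    | some m => pvLoopA rest (mods ++ [m])

def determine_mods (stats : List Int) : List Int := (pvLoopA stats []).getD []

-- ===== PORT B =====
def determine_mods_alt (stats : List Int) : List Int :=
  if stats.any (fun s => !(decide (1 ≤ s) && decide (s ≤ 30))) then []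
  else stats.map (fun s => PySem.Int.floordiv (s - 10) 2)

-- ===== PRECONDITION & SPEC =====
-- Pre_ excludes lists containing a stat outside 1..30, on which A returns the string "Error", not a list of ints.
def Pre_determine_mods (stats : List Int) : Prop := ∀ s ∈ stats, 1 ≤ s ∧ s ≤ 30
instance (stats : List Int) : Decidable (Pre_determine_mods stats) := by unfold Pre_determine_mods; infer_instance
def pvWitness_determine_mods : List Int := [1, 10, 18, 30]

def Spec_determine_mods (stats : List Int) (out : List Int) : Prop := out = determine_mods_alt stats
instance (stats : List Int) (out : List Int) : Decidable (Spec_determine_mods stats out) := by unfold Spec_determine_mods; infer_instance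

-- ===== CLAIM (what is proved, stated in full; the proofs are below) =====
def Claim_equal_determine_mods : Prop := ∀ (stats : List Int), Dom_determine_mods stats → Pre_determine_mods stats → Spec_determine_mods stats (determine_mods stats)

-- ===== LEMMAS AND PROOFS =====

-- the ladder agrees with the closed form on 1..30
lemma pvModA_eq (s : Int) (h1 : 1 ≤ s) (h2 : s ≤ 30) :
    pvModA s = some (PySem.Int.floordiv (s - 10) 2) := by
  interval_cases s <;> decide

lemma pvLoopA_eq (stats : List Int) (h : ∀ s ∈ stats, 1 ≤ s ∧ s ≤ 30) (acc : List Int) :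
    pvLoopA stats acc = some (acc ++ stats.map (fun s => PySem.Int.floordiv (s - 10) 2)) := by
  induction stats generalizing acc with
  | nil => simp [pvLoopA]
  | cons s rest ih =>
    have hs := h s (List.mem_cons_self ..)
    simp only [pvLoopA, pvModA_eq s hs.1 hs.2]
    rw [ih (fun x hx => h x (List.mem_cons_of_mem _ hx))]
    simp

-- ===== VERDICT (by name: the statement is the Claim_ definition above) =====
theorem determine_mods_spec : Claim_equal_determine_mods := by
  intro stats _ hpre
  unfold Spec_determine_mods determine_mods determine_mods_alt
  rw [pvLoopA_eq stats hpre []]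
  have : stats.any (fun s => !(decide (1 ≤ s) && decide (s ≤ 30))) = false := by
    simp only [List.any_eq_false]
    intro s hs
    have := hpre s hs
    simp [this.1, this.2]
  simp only [this, Bool.false_eq_true, if_false, Option.getD_some, List.nil_append]
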